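-- pv_equiv track=rewrite | github.com/daniel-reich/turbo-robot | baBNZFCozmjNhbp9Q_4.py | box_seq
-- ===== SOURCE A (Python) =====
-- def box_seq(step):
--   ans = 0
--   for i in range(1,step+1):
--     if i%2 == 1:
--       ans += 3
--     else:
--       ans -= 1
--   return ans
-- ===== SOURCE B (Python) =====
-- def box_seq(step):
--     # closed form: ceil(step/2) odd indices contribute +3 each, floor(step/2) even indices -1 each
--     if step <= 0:
--         return 0
--     return 3 * ((step + 1) // 2) - step // 2
-- ===== Notes on version B (the rewrite author's own statement) =====
-- stated objective: faster
-- what changed: Replaced the loop over the range by a constant-time closed form computed from the counts of odd and even numbers in the range.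
import Mathlib
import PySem

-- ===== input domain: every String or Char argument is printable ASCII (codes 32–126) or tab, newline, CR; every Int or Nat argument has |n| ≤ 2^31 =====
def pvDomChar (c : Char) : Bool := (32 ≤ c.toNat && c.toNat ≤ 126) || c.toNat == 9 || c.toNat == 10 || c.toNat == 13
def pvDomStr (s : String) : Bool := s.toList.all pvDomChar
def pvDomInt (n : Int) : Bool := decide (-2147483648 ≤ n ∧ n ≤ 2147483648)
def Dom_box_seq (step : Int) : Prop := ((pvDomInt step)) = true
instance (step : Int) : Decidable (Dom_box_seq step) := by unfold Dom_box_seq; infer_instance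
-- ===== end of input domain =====

-- B replaces A's O(step) loop by an O(1) closed form from the counts of odds and evens in 1..step.

-- ===== PORT A =====
def box_seq (step : Int) : Int :=
  (PySem.List.pyRange 1 (step + 1) 1).foldl
    (fun ans i => if PySem.Int.mod i 2 = 1 then ans + 3 else ans - 1) 0

-- ===== PORT B =====
def box_seq_alt (step : Int) : Int :=
  if step ≤ 0 then 0
  else 3 * PySem.Int.floordiv (step + 1) 2 - PySem.Int.floordiv step 2

-- ===== PRECONDITION & SPEC =====
def Spec_box_seq (step : Int) (out : Int) : Prop := out = box_seq_alt step
instance (step : Int) (out : Int) : Decidable (Spec_box_seq step out) := by unfold Spec_box_seq; infer_instance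

-- ===== CLAIM (what is proved, stated in full; the proofs are below) =====
def Claim_equal_box_seq : Prop := ∀ (step : Int), Dom_box_seq step → Spec_box_seq step (box_seq step)

-- ===== LEMMAS AND PROOFS =====
theorem box_seq_loop (n : Nat) :
    (PySem.List.pyRange 1 ((n : Int) + 1) 1).foldl
      (fun ans i => if PySem.Int.mod i 2 = 1 then ans + 3 else ans - 1) 0
    = if (n : Int) % 2 = 0 then (n : Int) else (n : Int) + 2 := by
  induction n with
  | zero => simp [PySem.List.pyRange_one_eq_nil]
  | succ m ih =>
    have hsplit : PySem.List.pyRange 1 ((m : Int) + 1 + 1) 1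
        = PySem.List.pyRange 1 ((m : Int) + 1) 1 ++ [(m : Int) + 1] :=
      PySem.List.pyRange_one_succ_right (by omega)
    have hmod : PySem.Int.mod ((m : Int) + 1) 2 = ((m : Int) + 1) % 2 :=
      PySem.Int.mod_eq_emod_of_pos (by omega)
    push_cast
    rw [hsplit, List.foldl_append, ih]
    simp only [List.foldl, hmod]
    have h2 : ((m : Int)) % 2 = 0 ∨ ((m : Int)) % 2 = 1 := by omega
    rcases h2 with h | h <;> simp [h] <;> omega

theorem box_seq_spec : Claim_equal_box_seq := by
  intro step _
  unfold Spec_box_seq box_seq box_seq_alt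
  by_cases h : step ≤ 0
  · rw [PySem.List.pyRange_one_eq_nil (by omega)]
    simp [h]
  · obtain ⟨n, rfl⟩ : ∃ n : Nat, step = (n : Int) :=
      ⟨step.toNat, by omega⟩
    rw [box_seq_loop n]
    rw [PySem.Int.floordiv_eq_ediv_of_pos (by omega),
        PySem.Int.floordiv_eq_ediv_of_pos (by omega)]
    simp only [if_neg h]
    omega
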